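-- pv_equiv track=rewrite | github.com/HasanBradfordUni/myPublicFiles | Portfolio/Python Apps/Football chess/Football_chess V12.py | LB_moves
-- ===== SOURCE A (Python) =====
-- def LB_moves(moveFromX, moveFromY, moveToX, moveToY, size, player1Turn, player2Turn):
--     possibleMoves = []
--
--     moveDif = ((moveToX - moveFromX),(moveToY - moveFromY))
--
--     if player2Turn:
--         possibleMoves.append((-1,-1))
--     elif player1Turn:
--         possibleMoves.append((1,-1))
--
--     for x in range(size):
--         for y in range(size):
--             if x == y:
--                 if player2Turn:
--                     possibleMoves.append((x,-y))
--                     possibleMoves.append((x,y))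
--                 elif player1Turn:
--                     possibleMoves.append((-x,-y))
--                     possibleMoves.append((-x,y))
--
--     if moveDif in possibleMoves:
--         return True
--     else:
--         return False
-- ===== SOURCE B (Python) =====
-- def LB_moves(moveFromX, moveFromY, moveToX, moveToY, size, player1Turn, player2Turn):
--     dx = moveToX - moveFromX
--     dy = moveToY - moveFromY
--     if player2Turn:
--         return (dx == -1 and dy == -1) or (0 <= dx < size and abs(dy) == dx)
--     if player1Turn:
--         return (dx == 1 and dy == -1) or (0 <= -dx < size and abs(dy) == -dx)
--     return False
-- ===== Notes on version B (the rewrite author's own statement) =====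
-- stated objective: faster
-- what changed: A builds a list of allowed move differences with an O(size^2) nested loop over the board and tests membership; B checks the move difference directly with O(1) arithmetic (exact diagonal pattern plus the one fixed extra move per player).
import Mathlib
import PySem

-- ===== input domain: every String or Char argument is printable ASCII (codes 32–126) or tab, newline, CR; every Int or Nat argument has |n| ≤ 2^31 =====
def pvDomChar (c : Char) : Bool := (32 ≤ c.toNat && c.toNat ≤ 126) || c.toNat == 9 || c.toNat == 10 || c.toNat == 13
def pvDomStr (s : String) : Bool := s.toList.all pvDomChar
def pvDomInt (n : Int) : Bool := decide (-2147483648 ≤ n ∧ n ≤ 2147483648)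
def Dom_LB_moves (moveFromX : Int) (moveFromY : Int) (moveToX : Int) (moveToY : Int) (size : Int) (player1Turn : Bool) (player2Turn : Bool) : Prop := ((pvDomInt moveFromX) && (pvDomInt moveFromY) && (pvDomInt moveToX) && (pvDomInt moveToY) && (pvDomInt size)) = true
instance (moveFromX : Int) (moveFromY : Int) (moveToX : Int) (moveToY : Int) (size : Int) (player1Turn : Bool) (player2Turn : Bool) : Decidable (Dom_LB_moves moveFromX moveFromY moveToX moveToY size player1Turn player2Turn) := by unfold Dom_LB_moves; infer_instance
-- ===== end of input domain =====

-- B replaces A's O(size^2) nested loop building a move list with an O(1) arithmetic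
-- check of the move difference against the diagonal pattern (objective: faster).

-- ===== PORT A =====
def LB_moves (moveFromX : Int) (moveFromY : Int) (moveToX : Int) (moveToY : Int) (size : Int) (player1Turn : Bool) (player2Turn : Bool) : Bool :=
  let moveDif : Int × Int := (moveToX - moveFromX, moveToY - moveFromY)
  let possibleMoves : List (Int × Int) :=
    if player2Turn then [(-1, -1)] else if player1Turn then [(1, -1)] else []
  let possibleMoves :=
    (PySem.List.pyRange 0 size 1).foldl (fun acc x =>
      (PySem.List.pyRange 0 size 1).foldl (fun acc2 y =>
        if x == y then
          (if player2Turn then acc2 ++ [(x, -y), (x, y)]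
           else if player1Turn then acc2 ++ [(-x, -y), (-x, y)]
           else acc2)
        else acc2) acc) possibleMoves
  decide (moveDif ∈ possibleMoves)

-- ===== PORT B =====
def LB_moves_alt (moveFromX : Int) (moveFromY : Int) (moveToX : Int) (moveToY : Int) (size : Int) (player1Turn : Bool) (player2Turn : Bool) : Bool :=
  let dx := moveToX - moveFromX
  let dy := moveToY - moveFromY
  if player2Turn then
    (dx == -1 && dy == -1) || (decide (0 ≤ dx) && decide (dx < size) && |dy| == dx)
  else if player1Turn then
    (dx == 1 && dy == -1) || (decide (0 ≤ -dx) && decide (-dx < size) && |dy| == -dx)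
  else
    false

-- ===== PRECONDITION & SPEC =====
def Spec_LB_moves (moveFromX : Int) (moveFromY : Int) (moveToX : Int) (moveToY : Int) (size : Int) (player1Turn : Bool) (player2Turn : Bool) (out : Bool) : Prop := out = LB_moves_alt moveFromX moveFromY moveToX moveToY size player1Turn player2Turn
instance (moveFromX : Int) (moveFromY : Int) (moveToX : Int) (moveToY : Int) (size : Int) (player1Turn : Bool) (player2Turn : Bool) (out : Bool) : Decidable (Spec_LB_moves moveFromX moveFromY moveToX moveToY size player1Turn player2Turn out) := by unfold Spec_LB_moves; infer_instance

-- ===== CLAIM (what is proved, stated in full; the proofs are below) =====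
def Claim_equal_LB_moves : Prop := ∀ (moveFromX : Int) (moveFromY : Int) (moveToX : Int) (moveToY : Int) (size : Int) (player1Turn : Bool) (player2Turn : Bool), Dom_LB_moves moveFromX moveFromY moveToX moveToY size player1Turn player2Turn → Spec_LB_moves moveFromX moveFromY moveToX moveToY size player1Turn player2Turn (LB_moves moveFromX moveFromY moveToX moveToY size player1Turn player2Turn)

-- ===== LEMMAS AND PROOFS =====

-- push an append out of a branch so the LOOP-SHAPE lemma applies
theorem pv_ite_append {α : Type} (c : Prop) [Decidable c] (acc L : List α) :
    (if c then acc ++ L else acc) = acc ++ (if c then L else []) := by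
  split <;> simp

-- membership in A's loop-built list, as an existential over the range
theorem pv_mem_loop (size : Int) (m : Int × Int) (init : List (Int × Int))
    (L : Int → Int → List (Int × Int)) :
    m ∈ (PySem.List.pyRange 0 size 1).foldl (fun acc x =>
        (PySem.List.pyRange 0 size 1).foldl (fun acc2 y =>
          if x == y then acc2 ++ L x y else acc2) acc) init ↔
      m ∈ init ∨ ∃ x, 0 ≤ x ∧ x < size ∧ m ∈ L x x := by
  have h1 : ∀ (x : Int) (acc : List (Int × Int)),
      (PySem.List.pyRange 0 size 1).foldl (fun acc2 y =>
        if x == y then acc2 ++ L x y else acc2) acc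
      = acc ++ (PySem.List.pyRange 0 size 1).flatMap
          (fun y => if x == y then L x y else []) := by
    intro x acc
    calc (PySem.List.pyRange 0 size 1).foldl (fun acc2 y =>
            if x == y then acc2 ++ L x y else acc2) acc
        = (PySem.List.pyRange 0 size 1).foldl (fun acc2 y =>
            acc2 ++ (if x == y then L x y else [])) acc := by
          simp only [pv_ite_append]
      _ = _ := PySem.List.foldl_append_eq_flatMap _ _ _
  simp only [h1]
  rw [PySem.List.foldl_append_eq_flatMap]
  simp only [List.mem_append, List.mem_flatMap, PySem.List.mem_pyRange_one]
  constructor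
  · rintro (h | ⟨x, ⟨hx0, hxs⟩, y, ⟨_, _⟩, hm⟩)
    · exact Or.inl h
    · split at hm
      · next heq => exact Or.inr ⟨x, hx0, hxs, by simpa [beq_iff_eq.mp heq] using hm⟩
      · simp at hm
  · rintro (h | ⟨x, hx0, hxs, hm⟩)
    · exact Or.inl h
    · exact Or.inr ⟨x, ⟨hx0, hxs⟩, x, ⟨hx0, hxs⟩, by simpa using hm⟩

-- ===== VERDICT (by name: the statement is the Claim_ definition above) =====
theorem LB_moves_spec : Claim_equal_LB_moves := by
  intro mfx mfy mtx mty size p1 p2 _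
  unfold Spec_LB_moves LB_moves LB_moves_alt
  set dx := mtx - mfx with hdx
  set dy := mty - mfy with hdy
  rw [Bool.eq_iff_iff]
  simp only [decide_eq_true_iff]
  cases p2 <;> cases p1 <;>
    simp only [if_true, if_false, Bool.false_eq_true]
  · -- neither player's turn: the list stays empty and B returns false
    simp only [ite_self]
    simp [List.foldl_fixed]
  · -- player 1's turn
    rw [pv_mem_loop size (dx, dy)]
    simp only [Prod.mk.injEq, List.mem_cons, List.not_mem_nil, or_false,
      Bool.or_eq_true, Bool.and_eq_true, beq_iff_eq, decide_eq_true_iff]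
    constructor
    · rintro (⟨h1, h2⟩ | ⟨x, hx0, hxs, (⟨h1, h2⟩ | ⟨h1, h2⟩)⟩)
      · exact Or.inl ⟨h1, h2⟩
      · exact Or.inr ⟨⟨by omega, by omega⟩, by rw [abs_eq (by omega)]; omega⟩
      · exact Or.inr ⟨⟨by omega, by omega⟩, by rw [abs_eq (by omega)]; omega⟩
    · rintro (⟨h1, h2⟩ | ⟨⟨h0, hs⟩, habs⟩)
      · exact Or.inl ⟨h1, h2⟩
      · rcases abs_choice dy with h | h <;> rw [h] at habs <;>
          exact Or.inr ⟨-dx, by omega, by omega, by omega⟩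
  -- player 2's turn (whatever player1Turn is): the two remaining goals are identical
  all_goals
    rw [pv_mem_loop size (dx, dy)]
    simp only [Prod.mk.injEq, List.mem_cons, List.not_mem_nil, or_false,
      Bool.or_eq_true, Bool.and_eq_true, beq_iff_eq, decide_eq_true_iff]
    constructor
    · rintro (⟨h1, h2⟩ | ⟨x, hx0, hxs, (⟨h1, h2⟩ | ⟨h1, h2⟩)⟩)
      · exact Or.inl ⟨h1, h2⟩
      · exact Or.inr ⟨⟨by omega, by omega⟩, by rw [abs_eq (by omega)]; omega⟩
      · exact Or.inr ⟨⟨by omega, by omega⟩, by rw [abs_eq (by omega)]; omega⟩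
    · rintro (⟨h1, h2⟩ | ⟨⟨h0, hs⟩, habs⟩)
      · exact Or.inl ⟨h1, h2⟩
      · rcases abs_choice dy with h | h <;> rw [h] at habs <;>
          exact Or.inr ⟨dx, by omega, by omega, by omega⟩
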